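-- pv_equiv track=rewrite | github.com/hoThanhThien/RAG | backend/app/services/rag/prompting.py | build_context
-- ===== SOURCE A (Python) =====
-- from typing import Any, Dict, List, Optional
--
-- def build_context(sources: List[Dict[str, Any]], max_context_chars: int) -> str:
--     parts: List[str] = []
--     current_length = 0
--     for index, source in enumerate(sources, start=1):
--         block = (
--             f"[{index}] TourID={source.get('tour_id')} | Title={source.get('title')} | "
--             f"Location={source.get('location')} | Category={source.get('category_name')} | "
--             f"Price={source.get('price')} | ChunkType={source.get('chunk_type')}\n"
--             f"{source.get('text')}"
--         )
--         if current_length + len(block) > max_context_chars: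
--             break
--         parts.append(block)
--         current_length += len(block)
--     return "\n\n".join(parts)
-- ===== SOURCE B (Python) =====
-- from typing import Any, Dict, List
--
--
-- def _block(index: int, source: Dict[str, Any]) -> str:
--     return (
--         f"[{index}] TourID={source.get('tour_id')} | Title={source.get('title')} | "
--         f"Location={source.get('location')} | Category={source.get('category_name')} | "
--         f"Price={source.get('price')} | ChunkType={source.get('chunk_type')}\n"
--         f"{source.get('text')}"
--     )
--
--
-- def build_context(sources: List[Dict[str, Any]], max_context_chars: int) -> str:
--     blocks = [_block(i, s) for i, s in enumerate(sources, start=1)]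
--     totals = []
--     t = 0
--     for b in blocks:
--         t += len(b)
--         totals.append(t)
--     k = 0
--     while k < len(blocks) and totals[k] <= max_context_chars:
--         k += 1
--     return "\n\n".join(blocks[:k])
-- ===== Notes on version B (the rewrite author's own statement) =====
-- stated objective: alternative
-- what changed: A interleaves formatting, length accounting and the early break in one loop; B materializes all formatted blocks, builds a prefix-sum table of their lengths, finds the cutoff index where the running total first exceeds the limit, and joins that prefix.
import Mathlib
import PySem

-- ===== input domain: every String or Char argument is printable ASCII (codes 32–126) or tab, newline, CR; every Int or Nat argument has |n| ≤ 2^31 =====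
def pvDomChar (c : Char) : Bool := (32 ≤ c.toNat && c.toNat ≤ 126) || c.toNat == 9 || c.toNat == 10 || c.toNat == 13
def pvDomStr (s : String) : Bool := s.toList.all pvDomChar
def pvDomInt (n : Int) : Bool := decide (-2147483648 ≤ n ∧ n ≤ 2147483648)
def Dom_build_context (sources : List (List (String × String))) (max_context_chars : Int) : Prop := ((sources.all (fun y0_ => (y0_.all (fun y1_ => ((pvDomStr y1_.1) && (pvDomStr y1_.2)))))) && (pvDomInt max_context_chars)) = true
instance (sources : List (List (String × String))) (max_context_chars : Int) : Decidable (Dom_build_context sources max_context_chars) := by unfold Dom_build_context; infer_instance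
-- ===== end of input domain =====

-- B materializes all formatted blocks, builds a prefix-sum table of their lengths, finds the
-- cutoff index where the running total first exceeds the limit, and joins that prefix;
-- A interleaves formatting, length accounting and the early break in one loop. (alternative)

-- shared block formatter: `source.get(k)` formatted by the f-string ("None" when absent)
def pvGet (src : List (String × String)) (k : String) : String :=
  ((PySem.Dict.mk src).get? k).getD "None"

def pvFmt (idx : Int) (src : List (String × String)) : String :=
  "[" ++ PySem.Int.toStr idx ++ "] TourID=" ++ pvGet src "tour_id" ++ " | Title=" ++ pvGet src "title" ++
  " | Location=" ++ pvGet src "location" ++ " | Category=" ++ pvGet src "category_name" ++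
  " | Price=" ++ pvGet src "price" ++ " | ChunkType=" ++ pvGet src "chunk_type" ++ "\n" ++ pvGet src "text"

-- ===== PORT A =====
-- A's for-loop with early break, recursion over the enumerate list carrying (current_length, parts)
def pvLoopA (maxc : Int) : List (Int × List (String × String)) → Int → List String → List String
  | [], _, parts => parts
  | (idx, s) :: rest, cur, parts =>
      let block := pvFmt idx s
      if cur + PySem.Str.len block > maxc then parts
      else pvLoopA maxc rest (cur + PySem.Str.len block) (parts ++ [block])

def build_context (sources : List (List (String × String))) (max_context_chars : Int) : String :=
  PySem.Str.join "\n\n" (pvLoopA max_context_chars (PySem.List.enumerate sources 1) 0 [])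

-- ===== PORT B =====
-- Source B's while loop finding the cutoff index over the prefix-sum table
def pvCut (maxc : Int) : List Int → Nat
  | [] => 0
  | t :: rest => if t ≤ maxc then 1 + pvCut maxc rest else 0

def build_context_alt (sources : List (List (String × String))) (max_context_chars : Int) : String :=
  let blocks := (PySem.List.enumerate sources 1).map (fun p => pvFmt p.1 p.2)
  let totals := (blocks.foldl
    (fun st b => (st.1 + PySem.Str.len b, st.2 ++ [st.1 + PySem.Str.len b])) ((0 : Int), ([] : List Int))).2
  let k := pvCut max_context_chars totals
  PySem.Str.join "\n\n" (blocks.take k)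

-- ===== PRECONDITION & SPEC =====
def Spec_build_context (sources : List (List (String × String))) (max_context_chars : Int) (out : String) : Prop := out = build_context_alt sources max_context_chars
instance (sources : List (List (String × String))) (max_context_chars : Int) (out : String) : Decidable (Spec_build_context sources max_context_chars out) := by unfold Spec_build_context; infer_instance

-- ===== CLAIM (what is proved, stated in full; the proofs are below) =====
def Claim_equal_build_context : Prop := ∀ (sources : List (List (String × String))) (max_context_chars : Int), Dom_build_context sources max_context_chars → Spec_build_context sources max_context_chars (build_context sources max_context_chars)

-- ===== LEMMAS AND PROOFS =====

-- the prefix sums of block lengths starting at t (what Source B's totals loop builds)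
def pvPrefix (t : Int) : List String → List Int
  | [] => []
  | b :: rest => (t + PySem.Str.len b) :: pvPrefix (t + PySem.Str.len b) rest

theorem pvTotals_eq (blocks : List String) (t : Int) (ts : List Int) :
    (blocks.foldl
      (fun st b => (st.1 + PySem.Str.len b, st.2 ++ [st.1 + PySem.Str.len b])) (t, ts)).2
      = ts ++ pvPrefix t blocks := by
  induction blocks generalizing t ts with
  | nil => simp [pvPrefix]
  | cons b rest ih =>
      simp only [List.foldl, pvPrefix]
      rw [ih, List.append_assoc]
      rfl

theorem pvLoopA_eq (maxc : Int) (es : List (Int × List (String × String))) (cur : Int)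
    (parts : List String) :
    pvLoopA maxc es cur parts
      = parts ++ (es.map (fun p => pvFmt p.1 p.2)).take
          (pvCut maxc (pvPrefix cur (es.map (fun p => pvFmt p.1 p.2)))) := by
  induction es generalizing cur parts with
  | nil => simp [pvLoopA]
  | cons e rest ih =>
      obtain ⟨idx, s⟩ := e
      simp only [pvLoopA, List.map_cons, pvPrefix, pvCut]
      by_cases h : cur + PySem.Str.len (pvFmt idx s) > maxc
      · rw [if_pos h, if_neg (by omega)]
        simp
      · rw [if_neg h, if_pos (by omega), ih, Nat.add_comm, List.take_succ_cons,
          List.append_assoc, List.singleton_append]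

-- ===== VERDICT (by name: the statement is the Claim_ definition above) =====
theorem build_context_spec : Claim_equal_build_context := by
  intro sources maxc _
  unfold Spec_build_context build_context build_context_alt
  simp only [pvLoopA_eq, pvTotals_eq, List.nil_append]
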